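-- pv_equiv track=rewrite | github.com/GryffindorafAviator/LaiCode | 350. Replacements Of A And B.py | minReplacements
-- ===== SOURCE A (Python) =====
-- def minReplacements(input):
--   """
--   input: string input
--   return: int
--   """
--   n = len(input)
--   if n < 2:
--     return 0
--
--   changes_a = [0] * n
--   changes_b = [0] * n
--
--   for i in range(n):
--     if i == 0:
--       if input[0] == 'b':
--         changes_a[0] = 1
--       if input[n - 1] == 'a':
--         changes_b[n - 1] = 1
--     else:
--       if input[i] == 'b':
--         changes_a[i] = changes_a[i - 1] + 1
--       else:
--         changes_a[i] = changes_a[i - 1]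
--       if input[n - 1 - i] == 'a':
--         changes_b[n - 1 - i] = changes_b[n - i] + 1
--       else:
--         changes_b[n - 1 - i] = changes_b[n - i]
--
--   ans = min(changes_b[0], changes_a[n - 1])
--
--   for i in range(n - 1):
--     ans = min(ans, changes_a[i] + changes_b[i + 1])
--
--   return ans
-- ===== SOURCE B (Python) =====
-- def minReplacements(input):
--   """
--   input: string input
--   return: int
--   """
--   ones = 0
--   flips = 0
--   for c in input:
--     if c == 'b':
--       ones += 1
--     elif c == 'a':
--       flips = min(flips + 1, ones)
--   return flips
-- ===== Notes on version B (the rewrite author's own statement) =====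
-- stated objective: simpler
-- what changed: Replaced the two prefix/suffix DP arrays and the separate split-point minimization pass with a single left-to-right O(1)-space pass keeping only the b-count and the best flip count so far.
import Mathlib
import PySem

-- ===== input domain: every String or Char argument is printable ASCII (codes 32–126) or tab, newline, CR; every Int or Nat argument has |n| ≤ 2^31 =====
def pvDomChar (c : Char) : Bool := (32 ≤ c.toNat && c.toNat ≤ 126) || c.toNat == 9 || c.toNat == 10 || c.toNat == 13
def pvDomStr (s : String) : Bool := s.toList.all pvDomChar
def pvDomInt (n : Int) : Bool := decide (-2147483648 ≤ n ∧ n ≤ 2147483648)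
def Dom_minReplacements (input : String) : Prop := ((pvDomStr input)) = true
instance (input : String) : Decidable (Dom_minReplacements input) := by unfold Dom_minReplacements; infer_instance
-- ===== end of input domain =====

-- ===== PORT A =====
-- B (below) replaces A's two DP arrays + extra minimization pass by one O(1)-space left-to-right pass (simpler).
-- literal transliteration of A: build changes_a / changes_b in one interleaved loop, then minimize over splits
def pvStepA (cs : List Char) (n : Nat) (st : List Int × List Int) (i : Nat) : List Int × List Int :=
  if i = 0 then
    (if cs.getD 0 ' ' = 'b' then st.1.set 0 1 else st.1,
     if cs.getD (n - 1) ' ' = 'a' then st.2.set (n - 1) 1 else st.2)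
  else
    (st.1.set i (if cs.getD i ' ' = 'b' then st.1.getD (i - 1) 0 + 1 else st.1.getD (i - 1) 0),
     st.2.set (n - 1 - i) (if cs.getD (n - 1 - i) ' ' = 'a' then st.2.getD (n - i) 0 + 1 else st.2.getD (n - i) 0))

def minReplacements (input : String) : Int :=
  let cs := input.toList
  let n := cs.length
  if n < 2 then 0
  else
    let st := (List.range n).foldl (pvStepA cs n) (List.replicate n (0 : Int), List.replicate n (0 : Int))
    let ans := min (st.2.getD 0 0) (st.1.getD (n - 1) 0)
    (List.range (n - 1)).foldl (fun a i => min a (st.1.getD i 0 + st.2.getD (i + 1) 0)) ans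

-- ===== PORT B =====
def pvStepB (st : Int × Int) (c : Char) : Int × Int :=
  if c = 'b' then (st.1 + 1, st.2)
  else if c = 'a' then (st.1, min (st.2 + 1) st.1)
  else st

def minReplacements_alt (input : String) : Int :=
  (input.toList.foldl pvStepB (0, 0)).2

-- ===== PRECONDITION & SPEC =====
def Spec_minReplacements (input : String) (out : Int) : Prop := out = minReplacements_alt input
instance (input : String) (out : Int) : Decidable (Spec_minReplacements input out) := by unfold Spec_minReplacements; infer_instance

-- ===== CLAIM (what is proved, stated in full; the proofs are below) =====
def Claim_equal_minReplacements : Prop := ∀ (input : String), Dom_minReplacements input → Spec_minReplacements input (minReplacements input)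

-- ===== LEMMAS AND PROOFS =====

def cntB (l : List Char) : Int := (l.count 'b' : Int)
def cntA (l : List Char) : Int := (l.count 'a' : Int)

-- cost of splitting p at position k: flip the b's before k and the a's from k on
def gsp (p : List Char) (k : Nat) : Int := cntB (p.take k) + cntA (p.drop k)

-- minimum split cost over all k in [0, |p|]
def splits (p : List Char) : Int :=
  (List.range (p.length + 1)).foldl (fun a k => min a (gsp p k)) (cntA p)

theorem foldl_min_pull {α : Type} (f : α → Int) (l : List α) : ∀ (a x : Int),
    l.foldl (fun b y => min b (f y)) (min a x) = min (l.foldl (fun b y => min b (f y)) a) x := by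
  induction l with
  | nil => intro a x; simp
  | cons y t ih =>
    intro a x
    simp only [List.foldl_cons]
    rw [min_right_comm a x (f y), ih]

theorem foldl_min_le_init {α : Type} (f : α → Int) (l : List α) : ∀ a : Int,
    l.foldl (fun b y => min b (f y)) a ≤ a := by
  induction l with
  | nil => intro a; simp
  | cons y t ih =>
    intro a
    simp only [List.foldl_cons]
    exact le_trans (ih (min a (f y))) (min_le_left _ _)

theorem foldl_min_le_mem {α : Type} (f : α → Int) (l : List α) (x : α) : ∀ a : Int, x ∈ l →
    l.foldl (fun b y => min b (f y)) a ≤ f x := by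
  induction l with
  | nil => intro a hx; simp at hx
  | cons y t ih =>
    intro a hx
    simp only [List.foldl_cons]
    rcases List.mem_cons.1 hx with h | h
    · subst h; exact le_trans (foldl_min_le_init f t _) (min_le_right _ _)
    · exact ih _ h

theorem foldl_min_add_one {α : Type} (f : α → Int) (l : List α) : ∀ a : Int,
    l.foldl (fun b y => min b (f y + 1)) (a + 1) = l.foldl (fun b y => min b (f y)) a + 1 := by
  induction l with
  | nil => intro a; simp
  | cons y t ih =>
    intro a
    simp only [List.foldl_cons]
    rw [min_add_add_right a (f y) 1]
    exact ih (min a (f y))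

theorem foldl_min_congr {α : Type} (f g : α → Int) : ∀ (l : List α) (a : Int),
    (∀ x ∈ l, f x = g x) →
    l.foldl (fun b y => min b (f y)) a = l.foldl (fun b y => min b (g y)) a := by
  intro l
  induction l with
  | nil => intro a h; rfl
  | cons y t ih =>
    intro a h
    simp only [List.foldl_cons]
    rw [h y (by simp)]
    exact ih _ (fun x hx => h x (by simp [hx]))

theorem splits_le_cntB (p : List Char) : splits p ≤ cntB p := by
  have h := foldl_min_le_mem (gsp p) (List.range (p.length + 1)) p.length (cntA p)
    List.self_mem_range_succ
  have hg : gsp p p.length = cntB p := by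
    unfold gsp
    rw [List.take_length, List.drop_length]
    simp [cntA]
  rw [hg] at h
  unfold splits
  exact h

theorem gsp_append (p : List Char) (c : Char) (k : Nat) (hk : k ≤ p.length) :
    gsp (p ++ [c]) k = gsp p k + (if c = 'a' then 1 else 0) := by
  unfold gsp cntA cntB
  rw [List.take_append_of_le_length hk, List.drop_append_of_le_length hk]
  by_cases ha : c = 'a' <;> simp [ha, List.count_append] <;> omega

theorem splits_append (p : List Char) (c : Char) :
    splits (p ++ [c]) =
      if c = 'b' then splits p
      else if c = 'a' then min (splits p + 1) (cntB p)
      else splits p := by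
  have hfin : gsp (p ++ [c]) (p.length + 1) = cntB p + (if c = 'b' then 1 else 0) := by
    unfold gsp
    have h1 : (p ++ [c]).length = p.length + 1 := by simp
    rw [← h1, List.take_length, List.drop_length]
    unfold cntB cntA
    by_cases hb : c = 'b' <;> simp [hb, List.count_append]
  have hinit : cntA (p ++ [c]) = cntA p + (if c = 'a' then 1 else 0) := by
    unfold cntA
    by_cases ha : c = 'a' <;> simp [ha, List.count_append]
  have hmain : splits (p ++ [c]) =
      min ((List.range (p.length + 1)).foldl
            (fun b k => min b (gsp p k + (if c = 'a' then 1 else 0)))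
            (cntA p + (if c = 'a' then 1 else 0)))
          (cntB p + (if c = 'b' then 1 else 0)) := by
    unfold splits
    have h1 : (p ++ [c]).length = p.length + 1 := by simp
    rw [h1, List.range_succ, List.foldl_append]
    simp only [List.foldl_cons, List.foldl_nil]
    rw [hfin, hinit]
    rw [foldl_min_congr (gsp (p ++ [c])) (fun k => gsp p k + (if c = 'a' then 1 else 0))
      (List.range (p.length + 1)) (cntA p + (if c = 'a' then 1 else 0))
      (fun k hk => gsp_append p c k (by have := List.mem_range.1 hk; omega))]
  rw [hmain]
  by_cases hb : c = 'b'
  · have ha' : ¬ c = 'a' := by rw [hb]; decide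
    simp only [if_pos hb, if_neg ha', add_zero]
    rw [show (List.range (p.length + 1)).foldl (fun b k => min b (gsp p k)) (cntA p) = splits p
      from rfl]
    exact min_eq_left (le_trans (splits_le_cntB p) (by omega))
  · by_cases ha : c = 'a'
    · simp only [if_pos ha, if_neg hb, add_zero]
      rw [foldl_min_add_one]
      rw [show (List.range (p.length + 1)).foldl (fun b k => min b (gsp p k)) (cntA p) = splits p
        from rfl]
    · simp only [if_neg ha, if_neg hb, add_zero]
      rw [show (List.range (p.length + 1)).foldl (fun b k => min b (gsp p k)) (cntA p) = splits p
        from rfl]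
      exact min_eq_left (splits_le_cntB p)

theorem foldB_inv (p : List Char) : p.foldl pvStepB (0, 0) = (cntB p, splits p) := by
  induction p using List.reverseRecOn with
  | nil => decide
  | append_singleton p c ih =>
    rw [List.foldl_append, ih]
    simp only [List.foldl_cons, List.foldl_nil]
    rw [splits_append]
    have hB : cntB (p ++ [c]) = cntB p + (if c = 'b' then 1 else 0) := by
      unfold cntB
      by_cases hb : c = 'b' <;> simp [hb, List.count_append]
    rw [hB]
    unfold pvStepB
    by_cases hb : c = 'b'
    · simp [hb]
    · by_cases ha : c = 'a' <;> simp [hb, ha]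

theorem alt_eq_splits (input : String) : minReplacements_alt input = splits input.toList := by
  unfold minReplacements_alt
  rw [foldB_inv]

theorem pv_getD_set_self (l : List Int) (i : Nat) (v : Int) (h : i < l.length) :
    (l.set i v).getD i 0 = v := by
  simp [List.getD_eq_getElem?_getD, List.getElem?_set, h]

theorem pv_getD_set_ne (l : List Int) (i j : Nat) (v : Int) (h : i ≠ j) :
    (l.set i v).getD j 0 = l.getD j 0 := by
  simp [List.getD_eq_getElem?_getD, List.getElem?_set, h]

theorem pv_getD_replicate (n i : Nat) : (List.replicate n (0 : Int)).getD i 0 = 0 := by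
  by_cases h : i < n <;> simp [List.getD_eq_getElem?_getD, h]

theorem cntB_take_succ (cs : List Char) (k : Nat) (h : k < cs.length) :
    cntB (cs.take (k + 1)) = cntB (cs.take k) + (if cs.getD k ' ' = 'b' then 1 else 0) := by
  have hso : cs[k]? = some cs[k] := List.getElem?_eq_getElem h
  have hD : cs.getD k ' ' = cs[k] := by rw [List.getD_eq_getElem?_getD, hso]; rfl
  have hsing : List.count 'b' [cs[k]] = (if cs[k] = 'b' then 1 else 0) := by
    by_cases hb : cs[k] = 'b' <;> simp [hb]
  unfold cntB
  rw [List.take_succ, hso, hD]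
  rw [show (some cs[k]).toList = [cs[k]] from rfl, List.count_append, hsing]
  by_cases hb : cs[k] = 'b' <;> simp [hb] <;> omega

theorem cntA_drop (cs : List Char) (j : Nat) (h : j < cs.length) :
    cntA (cs.drop j) = (if cs.getD j ' ' = 'a' then 1 else 0) + cntA (cs.drop (j + 1)) := by
  have hso : cs[j]? = some cs[j] := List.getElem?_eq_getElem h
  have hD : cs.getD j ' ' = cs[j] := by rw [List.getD_eq_getElem?_getD, hso]; rfl
  unfold cntA
  rw [List.drop_eq_getElem_cons h, hD, List.count_cons]
  by_cases ha : cs[j] = 'a' <;> simp [ha] <;> omega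

theorem arr_inv (cs : List Char) (n : Nat) (hn : n = cs.length) :
    ∀ k, 1 ≤ k → k ≤ n →
      (((List.range k).foldl (pvStepA cs n) (List.replicate n (0 : Int), List.replicate n (0 : Int))).1.length = n) ∧
      (((List.range k).foldl (pvStepA cs n) (List.replicate n (0 : Int), List.replicate n (0 : Int))).2.length = n) ∧
      (∀ i < k, ((List.range k).foldl (pvStepA cs n) (List.replicate n (0 : Int), List.replicate n (0 : Int))).1.getD i 0 = cntB (cs.take (i + 1))) ∧
      (∀ j, n - k ≤ j → j < n → ((List.range k).foldl (pvStepA cs n) (List.replicate n (0 : Int), List.replicate n (0 : Int))).2.getD j 0 = cntA (cs.drop j)) := by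
  intro k hk1
  induction k, hk1 using Nat.le_induction with
  | base =>
    intro h1n
    refine ⟨?_, ?_, ?_, ?_⟩
    · show (if cs.getD 0 ' ' = 'b' then (List.replicate n (0 : Int)).set 0 1
          else List.replicate n (0 : Int)).length = n
      split_ifs <;> simp
    · show (if cs.getD (n - 1) ' ' = 'a' then (List.replicate n (0 : Int)).set (n - 1) 1
          else List.replicate n (0 : Int)).length = n
      split_ifs <;> simp
    · intro i hi
      have hi0 : i = 0 := by omega
      subst hi0
      show (if cs.getD 0 ' ' = 'b' then (List.replicate n (0 : Int)).set 0 1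
          else List.replicate n (0 : Int)).getD 0 0 = cntB (cs.take (0 + 1))
      have h01 : cntB (cs.take (0 + 1)) = (if cs.getD 0 ' ' = 'b' then 1 else 0) := by
        have h := cntB_take_succ cs 0 (by omega)
        simpa [cntB] using h
      rw [h01]
      split_ifs with hb
      · exact pv_getD_set_self _ 0 1 (by simp; omega)
      · exact pv_getD_replicate n 0
    · intro j hj1 hj2
      have hj : j = n - 1 := by omega
      subst hj
      show (if cs.getD (n - 1) ' ' = 'a' then (List.replicate n (0 : Int)).set (n - 1) 1
          else List.replicate n (0 : Int)).getD (n - 1) 0 = cntA (cs.drop (n - 1))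
      have h02 : cntA (cs.drop (n - 1)) = (if cs.getD (n - 1) ' ' = 'a' then 1 else 0) := by
        have h := cntA_drop cs (n - 1) (by omega)
        rw [show n - 1 + 1 = cs.length from by omega] at h
        simpa [cntA] using h
      rw [h02]
      split_ifs with ha
      · exact pv_getD_set_self _ (n - 1) 1 (by simp; omega)
      · exact pv_getD_replicate n (n - 1)
  | succ m hm ih =>
    intro hm1n
    obtain ⟨hl1, hl2, hca, hcb⟩ := ih (by omega)
    rw [List.range_succ, List.foldl_append]
    simp only [List.foldl_cons, List.foldl_nil]
    set st := (List.range m).foldl (pvStepA cs n) (List.replicate n (0 : Int), List.replicate n (0 : Int)) with hst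
    have estep : pvStepA cs n st m =
        (st.1.set m (if cs.getD m ' ' = 'b' then st.1.getD (m - 1) 0 + 1 else st.1.getD (m - 1) 0),
         st.2.set (n - 1 - m) (if cs.getD (n - 1 - m) ' ' = 'a' then st.2.getD (n - m) 0 + 1
           else st.2.getD (n - m) 0)) := by
      unfold pvStepA
      rw [if_neg (show ¬ m = 0 from by omega)]
    rw [estep]
    refine ⟨by simp [hl1], by simp [hl2], ?_, ?_⟩
    · intro i hi
      show (st.1.set m (if cs.getD m ' ' = 'b' then st.1.getD (m - 1) 0 + 1
          else st.1.getD (m - 1) 0)).getD i 0 = cntB (cs.take (i + 1))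
      by_cases him : i = m
      · rw [him, pv_getD_set_self _ _ _ (by rw [hl1]; omega)]
        have h1 := hca (m - 1) (by omega)
        rw [show m - 1 + 1 = m from by omega] at h1
        rw [h1, cntB_take_succ cs m (by omega)]
        split_ifs <;> ring
      · rw [pv_getD_set_ne _ _ _ _ (Ne.symm him)]
        exact hca i (by omega)
    · intro j hj1 hj2
      show (st.2.set (n - 1 - m) (if cs.getD (n - 1 - m) ' ' = 'a' then st.2.getD (n - m) 0 + 1
          else st.2.getD (n - m) 0)).getD j 0 = cntA (cs.drop j)
      by_cases hjm : j = n - 1 - m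
      · rw [hjm, pv_getD_set_self _ _ _ (by rw [hl2]; omega)]
        have h2 := hcb (n - m) (by omega) (by omega)
        rw [h2, cntA_drop cs (n - 1 - m) (by omega),
          show n - 1 - m + 1 = n - m from by omega]
        split_ifs <;> ring
      · rw [pv_getD_set_ne _ _ _ _ (Ne.symm hjm)]
        exact hcb j (by omega) hj2

theorem splits_small (cs : List Char) (h : cs.length < 2) : splits cs = 0 := by
  match cs with
  | [] => decide
  | [c] =>
    rw [show [c] = ([] : List Char) ++ [c] from rfl, splits_append]
    have h0 : splits ([] : List Char) = 0 := by decide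
    have hb0 : cntB ([] : List Char) = 0 := by decide
    rw [h0, hb0]
    split_ifs <;> simp
  | a :: b :: t =>
    simp only [List.length_cons] at h
    omega

theorem a_eq_splits (input : String) : minReplacements input = splits input.toList := by
  simp only [minReplacements]
  by_cases h : input.toList.length < 2
  · rw [if_pos h]
    exact (splits_small _ h).symm
  · rw [if_neg h]
    set cs := input.toList with hcs
    set n := cs.length with hnn
    obtain ⟨hl1, hl2, hca, hcb⟩ := arr_inv cs n hnn n (by omega) (le_refl n)
    set st := (List.range n).foldl (pvStepA cs n) (List.replicate n (0 : Int), List.replicate n (0 : Int)) with hst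
    have ht : cs.take n = cs := by rw [hnn]; exact List.take_length
    have hd : cs.drop n = [] := by rw [hnn]; exact List.drop_length
    have h0 : st.2.getD 0 0 = gsp cs 0 := by
      rw [hcb 0 (by omega) (by omega)]
      simp [gsp, cntB]
    have h1 : st.1.getD (n - 1) 0 = gsp cs n := by
      rw [hca (n - 1) (by omega), show n - 1 + 1 = n from by omega]
      simp [gsp, cntA, ht, hd]
    have hterm : ∀ i ∈ List.range (n - 1),
        st.1.getD i 0 + st.2.getD (i + 1) 0 = gsp cs (i + 1) := by
      intro i hi
      have hi' := List.mem_range.1 hi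
      rw [hca i (by omega), hcb (i + 1) (by omega) (by omega)]
      rfl
    rw [foldl_min_congr (fun i => st.1.getD i 0 + st.2.getD (i + 1) 0) (fun i => gsp cs (i + 1))
      (List.range (n - 1)) (min (st.2.getD 0 0) (st.1.getD (n - 1) 0)) hterm]
    rw [h0, h1, foldl_min_pull (fun i => gsp cs (i + 1)) (List.range (n - 1)) (gsp cs 0) (gsp cs n)]
    unfold splits
    rw [← hnn]
    simp only [List.range_succ_eq_map, List.foldl_cons, List.foldl_map, Nat.succ_eq_add_one]
    rw [show min (cntA cs) (gsp cs 0) = gsp cs 0 from by unfold gsp cntB; simp]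
    have hrn : List.range n = List.range (n - 1) ++ [n - 1] := by
      conv_lhs => rw [show n = n - 1 + 1 from by omega, List.range_succ]
    rw [hrn, List.foldl_append]
    simp only [List.foldl_cons, List.foldl_nil]
    rw [show n - 1 + 1 = n from by omega]

-- ===== VERDICT (by name: the statement is the Claim_ definition above) =====
theorem minReplacements_spec : Claim_equal_minReplacements := by
  intro input _
  unfold Spec_minReplacements
  rw [a_eq_splits, alt_eq_splits]
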